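-- pv_equiv track=rewrite | github.com/philer/advent-of-code | day14.py | roll_line
-- ===== SOURCE A (Python) =====
-- from collections.abc import Sequence
--
-- def roll_line(row: Sequence[str]) -> list[str]:
--     row = list(row)
--     current_stop = 0
--     for idx in range(len(row)):
--         match row[idx]:
--             case ".":
--                 pass
--             case "#":
--                 current_stop = idx + 1
--             case "O":
--                 if idx == current_stop:
--                     current_stop = idx + 1
--                 else:
--                     row[idx] = "."
--                     row[current_stop] = "O"
--                     current_stop += 1
--     return row
-- ===== SOURCE B (Python) =====
-- def _pack(seg):
--     k = seg.count("O")
--     return ["O"] * k + ["." if c == "O" else c for c in seg[k:]]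
--
-- def roll_line(row):
--     result = []
--     seg = []
--     for c in row:
--         if c == "#":
--             result += _pack(seg)
--             result.append("#")
--             seg = []
--         else:
--             seg.append(c)
--     result += _pack(seg)
--     return result
-- ===== Notes on version B (the rewrite author's own statement) =====
-- stated objective: alternative
-- what changed: Replaces A's single in-place scan with a running write pointer (current_stop) and element swaps by a segment decomposition: split the row at '#', pack each segment's rocks to the left by counting them, and rebuild the tail with moved rocks blanked.
import Mathlib
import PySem

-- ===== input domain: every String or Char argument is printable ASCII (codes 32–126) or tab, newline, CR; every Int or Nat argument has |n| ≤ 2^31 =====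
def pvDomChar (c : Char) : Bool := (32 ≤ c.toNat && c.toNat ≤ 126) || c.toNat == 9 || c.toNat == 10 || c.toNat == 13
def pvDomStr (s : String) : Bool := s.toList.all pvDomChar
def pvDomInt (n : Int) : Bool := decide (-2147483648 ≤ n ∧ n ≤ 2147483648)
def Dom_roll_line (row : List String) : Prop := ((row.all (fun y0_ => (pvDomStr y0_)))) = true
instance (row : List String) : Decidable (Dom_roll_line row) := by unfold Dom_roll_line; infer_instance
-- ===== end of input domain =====

-- B rebuilds the row from '#'-separated segments (count the rocks, pack them left)
-- instead of A's in-place scan with a running write pointer; same cost, different decomposition.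

-- ===== PORT A =====
-- step of A's for-loop: state = (mutable row copy, current_stop); idx and current_stop
-- stay in [0, len(row)] in Python, so they are carried as Nat.
def rollStepA (st : List String × Nat) (idx : Nat) : List String × Nat :=
  let r := st.1
  let stop := st.2
  let c := r.getD idx ""          -- row[idx]; idx < len(r) always, so getD is exact here
  if c = "." then (r, stop)
  else if c = "#" then (r, idx + 1)
  else if c = "O" then
    if idx = stop then (r, idx + 1)
    else ((r.set idx ".").set stop "O", stop + 1)
  else (r, stop)                  -- match falls through on any other string

def roll_line (row : List String) : List String :=
  ((List.range row.length).foldl rollStepA (row, 0)).1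

-- ===== PORT B =====
def pvPack (seg : List String) : List String :=
  let k := seg.count "O"
  List.replicate k "O" ++ (seg.drop k).map (fun c => if c = "O" then "." else c)

def rollStepB (st : List String × List String) (c : String) : List String × List String :=
  if c = "#" then (st.1 ++ pvPack st.2 ++ ["#"], [])
  else (st.1, st.2 ++ [c])

def roll_line_alt (row : List String) : List String :=
  let st := row.foldl rollStepB ([], [])
  st.1 ++ pvPack st.2

-- ===== PRECONDITION & SPEC =====
def Spec_roll_line (row : List String) (out : List String) : Prop := out = roll_line_alt row
instance (row : List String) (out : List String) : Decidable (Spec_roll_line row out) := by unfold Spec_roll_line; infer_instance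

-- ===== CLAIM (what is proved, stated in full; the proofs are below) =====
def Claim_equal_roll_line : Prop := ∀ (row : List String), Dom_roll_line row → Spec_roll_line row (roll_line row)

-- ===== LEMMAS AND PROOFS =====

theorem pvPack_length (seg : List String) : (pvPack seg).length = seg.length := by
  simp [pvPack]
  have := List.count_le_length (l := seg) (a := "O")
  omega

-- appending a non-'#' char to the pending segment appends its dotified form to the pack,
-- except when the segment is all rocks and the char is 'O'
theorem pvPack_append_of_ne (seg : List String) (c : String) (h : c ≠ "O") :
    pvPack (seg ++ [c]) = pvPack seg ++ [c] := by
  have hk : (seg ++ [c]).count "O" = seg.count "O" := by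
    simp [List.count_append, h]
  have hle : seg.count "O" ≤ seg.length := List.count_le_length
  simp [pvPack, hk, List.drop_append_of_le_length hle, h]

theorem pvPack_append_O_full (seg : List String) (h : seg.count "O" = seg.length) :
    pvPack (seg ++ ["O"]) = pvPack seg ++ ["O"] := by
  have hk : (seg ++ ["O"]).count "O" = seg.length + 1 := by
    simp [List.count_append, h]
  simp [pvPack, hk, h, List.replicate_succ' (n := seg.length)]

theorem pvPack_append_O_part (seg : List String) (h : seg.count "O" < seg.length) :
    pvPack (seg ++ ["O"]) =
      List.replicate (seg.count "O" + 1) "O" ++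
        (seg.drop (seg.count "O" + 1)).map (fun c => if c = "O" then "." else c) ++ ["."] := by
  have hk : (seg ++ ["O"]).count "O" = seg.count "O" + 1 := by
    simp [List.count_append]
  simp [pvPack, hk, List.drop_append_of_le_length (by omega : seg.count "O" + 1 ≤ seg.length)]

-- length bookkeeping for B's fold: the closed part plus the pending segment cover the input
theorem rollB_len (l : List String) : ∀ a s : List String,
    ((l.foldl rollStepB (a, s)).1).length + ((l.foldl rollStepB (a, s)).2).length
      = a.length + s.length + l.length := by
  induction l with
  | nil => intro a s; simp
  | cons c t ih =>
    intro a s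
    simp only [List.foldl_cons, rollStepB]
    by_cases hc : c = "#"
    · rw [if_pos hc, ih]
      simp [pvPack_length]
      omega
    · rw [if_neg hc, ih]
      simp
      omega

-- one step of A's loop, expressed on the invariant state, is one step of B's fold
theorem roll_step (row a s : List String) (i : Nat) (hi : i < row.length)
    (hlen : a.length + s.length = i) :
    rollStepA (a ++ pvPack s ++ row.drop i, a.length + s.count "O") i
      = ((rollStepB (a, s) row[i]).1 ++ pvPack (rollStepB (a, s) row[i]).2 ++ row.drop (i + 1),
         ((rollStepB (a, s) row[i]).1).length + ((rollStepB (a, s) row[i]).2).count "O") := by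
  have hlenap : (a ++ pvPack s).length = i := by
    simp [pvPack_length]; omega
  have hdrop : row.drop i = row[i] :: row.drop (i + 1) := List.drop_eq_getElem_cons hi
  have hget : (a ++ pvPack s ++ row.drop i).getD i "" = row[i] := by
    rw [List.getD_eq_getElem?_getD,
        List.getElem?_append_right (hlenap.le), hlenap, Nat.sub_self, hdrop]
    rfl
  have hcnt : s.count "O" ≤ s.length := List.count_le_length
  simp only [rollStepA, hget, rollStepB]
  by_cases h1 : row[i] = "."
  · rw [if_pos h1, if_neg (by rw [h1]; decide : ¬ row[i] = "#")]
    rw [h1] at hdrop ⊢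
    rw [pvPack_append_of_ne s "." (by decide), hdrop]
    simp
  · rw [if_neg h1]
    by_cases h2 : row[i] = "#"
    · rw [if_pos h2, if_pos h2]
      refine Prod.ext ?_ ?_
      · rw [hdrop, h2]; simp [pvPack]
      · simp [pvPack_length]; omega
    · rw [if_neg h2, if_neg h2]
      by_cases h3 : row[i] = "O"
      · rw [if_pos h3]
        by_cases h4 : s.count "O" = s.length
        · -- pending segment is all rocks: the new rock stays put
          rw [if_pos (by omega : i = a.length + s.count "O")]
          rw [h3] at hdrop ⊢
          rw [pvPack_append_O_full s h4, hdrop]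
          refine Prod.ext ?_ ?_
          · simp
          · simp [List.count_append, h4]; omega
        · -- the new rock rolls to position current_stop
          have h4' : s.count "O" < s.length := lt_of_le_of_ne hcnt h4
          rw [if_neg (by omega : ¬ i = a.length + s.count "O")]
          rw [h3] at hdrop ⊢
          refine Prod.ext ?_ ?_
          · rw [hdrop, pvPack_append_O_part s h4']
            -- set idx "." : position i is the head of the untouched tail
            rw [List.set_append_right _ _ (hlenap.le), hlenap, Nat.sub_self,
                List.set_cons_zero]
            -- set stop "O" : position a.length + count is the first non-rock of the segment
            have hsp : (a ++ pvPack s) ++ "." :: row.drop (i + 1)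
                = (a ++ List.replicate (s.count "O") "O")
                    ++ ((if s[s.count "O"] = "O" then "." else s[s.count "O"])
                        :: (s.drop (s.count "O" + 1)).map (fun c => if c = "O" then "." else c)
                        ++ "." :: row.drop (i + 1)) := by
              rw [pvPack]
              simp only [List.drop_eq_getElem_cons h4', List.map_cons]
              simp
            rw [hsp, List.set_append_right _ _ (by simp)]
            simp [List.replicate_succ' (n := s.count "O")]
          · simp [List.count_append]
            omega
      · rw [if_neg h3]
        rw [pvPack_append_of_ne s row[i] h3, hdrop]
        simp [h3]

-- the loop invariant: after i steps A's state is B's closed part ++ pack of B's pending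
-- segment ++ the untouched tail, and current_stop = |closed| + (rocks in the pending segment)
theorem rollA_invariant (row : List String) :
    ∀ i, i ≤ row.length →
      (List.range i).foldl rollStepA (row, 0) =
        (((row.take i).foldl rollStepB ([], [])).1
            ++ pvPack ((row.take i).foldl rollStepB ([], [])).2
            ++ row.drop i,
         (((row.take i).foldl rollStepB ([], [])).1).length
            + (((row.take i).foldl rollStepB ([], [])).2).count "O") := by
  intro i
  induction i with
  | zero => intro _; simp [pvPack]
  | succ i ih =>
    intro h
    have hi : i < row.length := h
    have htake : row.take (i + 1) = row.take i ++ [row[i]] := by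
      rw [List.take_add_one, List.getElem?_eq_getElem hi]
      rfl
    have hlen : (((row.take i).foldl rollStepB ([], [])).1).length
        + (((row.take i).foldl rollStepB ([], [])).2).length = i := by
      have := rollB_len (row.take i) [] []
      simpa [List.length_take, Nat.min_eq_left (le_of_lt hi)] using this
    rw [List.range_succ, List.foldl_append, List.foldl_cons, List.foldl_nil,
        ih (le_of_lt hi), htake, List.foldl_append, List.foldl_cons, List.foldl_nil]
    exact roll_step row _ _ i hi hlen

theorem roll_line_spec : Claim_equal_roll_line := by
  intro row _
  unfold Spec_roll_line roll_line roll_line_alt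
  rw [rollA_invariant row row.length (le_refl _)]
  simp
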